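-- pv_equiv track=rewrite | github.com/Barnemat/Masteroppgave | genetic_algorithm/objectives/objective_3.py | get_line_ending_indices
-- ===== SOURCE A (Python) =====
-- def get_num_syls_in_line(line):
--     count = 0
--     for word in line:
--         for syl in word:
--             count += 1
--     return count
--
-- def get_line_ending_indices(lines):
--     line_ending_indices = []
--     index = 0
--
--     for line in lines:
--         syls = get_num_syls_in_line(line)
--         index += syls
--         line_ending_indices.append(index)
--
--     return line_ending_indices
-- ===== SOURCE B (Python) =====
-- def get_line_ending_indices(lines):
--     # Work back-to-front: start from the grand total of syllables and
--     # subtract each line's count while walking the lines in reverse.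
--     total = sum(len(word) for line in lines for word in line)
--     out = []
--     for line in reversed(lines):
--         out.append(total)
--         total -= sum(len(word) for word in line)
--     out.reverse()
--     return out
-- ===== Notes on version B (the rewrite author's own statement) =====
-- stated objective: alternative
-- what changed: Instead of a forward pass accumulating a running index, B first computes the grand syllable total over the flattened structure and then builds the result back-to-front, walking the lines in reverse and subtracting each line's count from the total.
import Mathlib
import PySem

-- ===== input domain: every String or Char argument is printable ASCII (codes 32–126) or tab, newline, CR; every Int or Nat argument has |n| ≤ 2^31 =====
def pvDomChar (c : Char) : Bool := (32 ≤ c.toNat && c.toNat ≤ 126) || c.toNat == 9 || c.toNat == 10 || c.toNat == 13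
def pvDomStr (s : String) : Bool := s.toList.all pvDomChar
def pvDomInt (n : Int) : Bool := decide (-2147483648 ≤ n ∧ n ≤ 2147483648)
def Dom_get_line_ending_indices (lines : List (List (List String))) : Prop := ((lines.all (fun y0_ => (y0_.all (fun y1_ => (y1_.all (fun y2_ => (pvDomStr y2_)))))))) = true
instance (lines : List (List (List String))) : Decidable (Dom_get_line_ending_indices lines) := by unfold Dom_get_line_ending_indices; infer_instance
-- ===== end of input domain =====

-- B builds the result back-to-front from the grand syllable total, subtracting per-line counts, instead of A's forward running-index accumulation (objective: alternative).


-- ===== PORT A =====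
-- nested loops of get_num_syls_in_line: count += 1 per syllable
def get_num_syls_in_line (line : List (List String)) : Int :=
  line.foldl (fun count word => word.foldl (fun c _syl => c + 1) count) 0

def get_line_ending_indices (lines : List (List (List String))) : List Int :=
  (lines.foldl (fun (st : List Int × Int) line =>
    let syls := get_num_syls_in_line line
    let index := st.2 + syls
    (st.1 ++ [index], index)) ([], 0)).1

-- ===== PORT B =====
-- grand total over the flattened structure, then a reverse walk subtracting per-line counts, then out.reverse()
def get_line_ending_indices_alt (lines : List (List (List String))) : List Int :=
  let total := ((lines.flatMap (fun line => line)).map (fun word => (word.length : Int))).sum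
  let st := lines.reverse.foldl (fun (st : List Int × Int) line =>
    (st.1 ++ [st.2], st.2 - (line.map (fun word => (word.length : Int))).sum)) ([], total)
  st.1.reverse

-- ===== PRECONDITION & SPEC =====
def Spec_get_line_ending_indices (lines : List (List (List String))) (out : List Int) : Prop := out = get_line_ending_indices_alt lines
instance (lines : List (List (List String))) (out : List Int) : Decidable (Spec_get_line_ending_indices lines out) := by unfold Spec_get_line_ending_indices; infer_instance

-- ===== CLAIM (what is proved, stated in full; the proofs are below) =====
def Claim_equal_get_line_ending_indices : Prop := ∀ (lines : List (List (List String))), Dom_get_line_ending_indices lines → Spec_get_line_ending_indices lines (get_line_ending_indices lines)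

-- ===== LEMMAS AND PROOFS =====

-- per-line count used in the proofs
def pvLineSum (line : List (List String)) : Int := (line.map (fun word => (word.length : Int))).sum

-- forward prefix sums (reference shape both ports are reduced to)
def pvAcc (a : Int) : List Int → List Int
  | [] => []
  | c :: cs => (a + c) :: pvAcc (a + c) cs

theorem num_syls_eq_sum (line : List (List String)) :
    get_num_syls_in_line line = pvLineSum line := by
  unfold get_num_syls_in_line pvLineSum
  suffices h : ∀ (c : Int), line.foldl (fun c word => word.foldl (fun c _ => c + 1) c) c
      = c + (line.map (fun word => (word.length : Int))).sum by
    simpa using h 0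
  induction line with
  | nil => simp
  | cons w ws ih =>
    intro c
    have hw : ∀ (c : Int), w.foldl (fun c _ => c + 1) c = c + w.length := by
      induction w with
      | nil => simp
      | cons x xs ihx => intro c; simp [List.foldl, ihx]; ring
    simp [List.foldl, hw, ih]; ring

theorem a_eq_acc (lines : List (List (List String))) :
    ∀ (res : List Int) (idx : Int),
    (lines.foldl (fun (st : List Int × Int) line =>
      let syls := get_num_syls_in_line line
      let index := st.2 + syls
      (st.1 ++ [index], index)) (res, idx)).1
    = res ++ pvAcc idx (lines.map pvLineSum) := by
  induction lines with
  | nil => simp [pvAcc]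
  | cons l ls ih =>
    intro res idx
    simp only [List.foldl]
    rw [ih]
    simp [pvAcc, num_syls_eq_sum]

-- back-to-front construction, in cons form
def pvBack (T : Int) : List (List (List String)) → List Int
  | [] => []
  | l :: ls => T :: pvBack (T - pvLineSum l) ls

theorem b_fold_eq_back (rs : List (List (List String))) :
    ∀ (out : List Int) (T : Int),
    (rs.foldl (fun (st : List Int × Int) line =>
      (st.1 ++ [st.2], st.2 - (line.map (fun word => (word.length : Int))).sum)) (out, T)).1
    = out ++ pvBack T rs := by
  induction rs with
  | nil => simp [pvBack]
  | cons l ls ih =>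
    intro out T
    simp only [List.foldl]
    rw [ih]
    simp [pvBack, pvLineSum]

theorem acc_append (a : Int) (cs : List Int) (c : Int) :
    pvAcc a (cs ++ [c]) = pvAcc a cs ++ [a + cs.sum + c] := by
  induction cs generalizing a with
  | nil => simp [pvAcc]
  | cons x xs ih => simp [pvAcc, ih]; ring_nf

theorem back_reverse_eq_acc (lines : List (List (List String))) :
    (pvBack ((lines.map pvLineSum).sum) lines.reverse).reverse
      = pvAcc 0 (lines.map pvLineSum) := by
  induction lines using List.reverseRecOn with
  | nil => simp [pvBack, pvAcc]
  | append_singleton ls l ih =>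
    have hs : ((ls ++ [l]).map pvLineSum).sum = (ls.map pvLineSum).sum + pvLineSum l := by
      simp
    rw [List.reverse_append]
    simp only [List.reverse_singleton, List.singleton_append, pvBack, hs]
    have : (ls.map pvLineSum).sum + pvLineSum l - pvLineSum l = (ls.map pvLineSum).sum := by ring
    rw [this, List.reverse_cons, ih, List.map_append, List.map_singleton, acc_append]
    simp

theorem flat_sum (lines : List (List (List String))) :
    ((lines.flatMap (fun line => line)).map (fun word => (word.length : Int))).sum
      = (lines.map pvLineSum).sum := by
  induction lines with
  | nil => simp
  | cons l ls ih =>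
    simp only [List.flatMap_cons, List.map_append, List.sum_append, ih,
      List.map_cons, List.sum_cons, pvLineSum]

-- ===== VERDICT (by name: the statement is the Claim_ definition above) =====
theorem get_line_ending_indices_spec : Claim_equal_get_line_ending_indices := by
  intro lines _
  unfold Spec_get_line_ending_indices get_line_ending_indices get_line_ending_indices_alt
  simp only [a_eq_acc lines [] 0, b_fold_eq_back, flat_sum, List.nil_append]
  exact (back_reverse_eq_acc lines).symm
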